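-- pv_equiv track=rewrite | github.com/SeanStafford/ARCHER | scripts/format_job.py | _strip_existing_metadata
-- ===== SOURCE A (Python) =====
-- def _strip_existing_metadata(text: str) -> str:
--     """Remove existing ## Metadata section from text."""
--     lines = text.split("\n")
--     result = []
--     in_metadata = False
--
--     for line in lines:
--         if line.strip().lower() == "## metadata":
--             in_metadata = True
--             continue
--         if in_metadata and line.startswith("## "):
--             in_metadata = False
--         if not in_metadata:
--             result.append(line)
--
--     return "\n".join(result)
-- ===== SOURCE B (Python) =====
-- def _is_meta(line):
--     return line.strip().lower() == "## metadata"
--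
--
-- def _is_boundary(line):
--     return line.startswith("## ") or _is_meta(line)
--
--
-- def _blocks(lines):
--     """Group lines into sections; each section starts at a boundary line."""
--     blocks = []
--     i = 0
--     while i < len(lines):
--         end = i + 1
--         while end < len(lines) and not _is_boundary(lines[end]):
--             end += 1
--         blocks.append(lines[i:end])
--         i = end
--     return blocks
--
--
-- def _strip_existing_metadata(text: str) -> str:
--     """Remove existing ## Metadata section from text."""
--     kept = [line
--             for block in _blocks(text.split("\n"))
--             if not _is_meta(block[0])
--             for line in block]
--     return "\n".join(kept)
-- ===== Notes on version B (the rewrite author's own statement) =====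
-- stated objective: alternative
-- what changed: Replaced the in_metadata flag state machine by an explicit sectioning-then-filter decomposition: group the lines into blocks starting at section-boundary lines, drop the blocks whose first line is the metadata heading, and rejoin the survivors.
import Mathlib
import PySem

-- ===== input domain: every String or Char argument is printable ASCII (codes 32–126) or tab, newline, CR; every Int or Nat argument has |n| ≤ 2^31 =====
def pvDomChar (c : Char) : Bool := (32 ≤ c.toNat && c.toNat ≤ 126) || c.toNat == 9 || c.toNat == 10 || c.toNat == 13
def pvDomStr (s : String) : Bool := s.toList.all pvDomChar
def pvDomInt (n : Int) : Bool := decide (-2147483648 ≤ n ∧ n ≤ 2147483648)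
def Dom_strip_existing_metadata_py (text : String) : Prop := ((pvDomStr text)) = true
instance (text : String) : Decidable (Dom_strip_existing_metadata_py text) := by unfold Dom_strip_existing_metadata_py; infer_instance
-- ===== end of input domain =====

-- B replaces A's in_metadata flag state machine by sectioning the lines into blocks and
-- filtering out metadata-headed blocks (objective: alternative decomposition, same cost).

-- ===== PORT A =====
-- line.strip().lower() == "## metadata"
def pvIsMeta (line : String) : Bool :=
  PySem.Str.lower (PySem.Str.strip line) == "## metadata"

-- the for-loop of A, state = (result, in_metadata); branches in source order
def pvLoopA : List String → List String → Bool → List String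
  | [], res, _ => res
  | line :: ls, res, m =>
    if pvIsMeta line then pvLoopA ls res true
    else if m && PySem.Str.startswith line "## " then pvLoopA ls (res ++ [line]) false
    else if m then pvLoopA ls res true
    else pvLoopA ls (res ++ [line]) false

def strip_existing_metadata_py (text : String) : String :=
  PySem.Str.join "\n" (pvLoopA ((PySem.Str.split? text "\n").getD []) [] false)

-- ===== PORT B =====
-- line.startswith("## ") or _is_meta(line)
def pvIsBoundary (line : String) : Bool :=
  PySem.Str.startswith line "## " || pvIsMeta line

-- _blocks: each section is the boundary (or first) line plus the following non-boundary lines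
def pvBlocksB : List String → List (List String)
  | [] => []
  | l :: ls =>
    (l :: ls.takeWhile (fun x => !pvIsBoundary x)) ::
      pvBlocksB (ls.dropWhile (fun x => !pvIsBoundary x))
  termination_by ls => ls.length
  decreasing_by exact Nat.lt_succ_of_le (List.length_dropWhile_le _ _)

-- the comprehension's per-block contribution: drop a block whose first line is metadata
def pvKeepB (b : List String) : List String :=
  if pvIsMeta (b.headD "") then [] else b

def strip_existing_metadata_py_alt (text : String) : String :=
  PySem.Str.join "\n" ((pvBlocksB ((PySem.Str.split? text "\n").getD [])).flatMap pvKeepB)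

-- ===== PRECONDITION & SPEC =====
def Spec_strip_existing_metadata_py (text : String) (out : String) : Prop := out = strip_existing_metadata_py_alt text
instance (text : String) (out : String) : Decidable (Spec_strip_existing_metadata_py text out) := by unfold Spec_strip_existing_metadata_py; infer_instance

-- ===== CLAIM (what is proved, stated in full; the proofs are below) =====
def Claim_equal_strip_existing_metadata_py : Prop := ∀ (text : String), Dom_strip_existing_metadata_py text → Spec_strip_existing_metadata_py text (strip_existing_metadata_py text)

-- ===== LEMMAS AND PROOFS =====

-- accumulating result factors out
lemma pvLoopA_res (ls : List String) : ∀ (res : List String) (m : Bool),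
    pvLoopA ls res m = res ++ pvLoopA ls [] m := by
  induction ls with
  | nil => intro res m; simp [pvLoopA]
  | cons line ls ih =>
    intro res m
    simp only [pvLoopA, List.nil_append]
    split_ifs with h1 h2 h3
    · exact ih res true
    · rw [ih (res ++ [line]) false, ih [line] false, List.append_assoc]
    · exact ih res true
    · rw [ih (res ++ [line]) false, ih [line] false, List.append_assoc]

-- inside metadata: non-boundary lines are skipped
lemma pvLoopA_skip (body : List String) (hb : ∀ x ∈ body, pvIsBoundary x = false)
    (rest : List String) : pvLoopA (body ++ rest) [] true = pvLoopA rest [] true := by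
  induction body with
  | nil => simp
  | cons x xs ih =>
    have hx := hb x (List.mem_cons_self ..)
    have hmeta : pvIsMeta x = false := by
      simp [pvIsBoundary] at hx; exact hx.2
    have hsw : PySem.Str.startswith x "## " = false := by
      simp [pvIsBoundary] at hx; exact hx.1
    simp only [List.cons_append, pvLoopA, hmeta, hsw]
    simp only [Bool.false_eq_true, if_false, Bool.and_false, if_true]
    exact ih (fun y hy => hb y (List.mem_cons_of_mem _ hy))

-- outside metadata: non-boundary lines are kept
lemma pvLoopA_keep (body : List String) (hb : ∀ x ∈ body, pvIsBoundary x = false)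
    (rest : List String) : pvLoopA (body ++ rest) [] false = body ++ pvLoopA rest [] false := by
  induction body with
  | nil => simp
  | cons x xs ih =>
    have hx := hb x (List.mem_cons_self ..)
    have hmeta : pvIsMeta x = false := by
      simp [pvIsBoundary] at hx; exact hx.2
    simp only [List.cons_append, pvLoopA, hmeta]
    simp only [Bool.false_eq_true, if_false, Bool.false_and]
    rw [pvLoopA_res]
    rw [ih (fun y hy => hb y (List.mem_cons_of_mem _ hy))]
    simp

-- the state machine equals the block decomposition (both start states that occur)
lemma pvMain : ∀ (n : Nat) (ls : List String), ls.length ≤ n →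
    pvLoopA ls [] false = (pvBlocksB ls).flatMap pvKeepB ∧
    ((ls = [] ∨ ∃ r rs, ls = r :: rs ∧ pvIsBoundary r = true) →
      pvLoopA ls [] true = (pvBlocksB ls).flatMap pvKeepB) := by
  intro n
  induction n with
  | zero =>
    intro ls hls
    have h0 : ls = [] := List.length_eq_zero_iff.mp (Nat.le_zero.mp hls)
    subst h0; simp [pvLoopA, pvBlocksB]
  | succ n ih =>
    intro ls hls
    cases ls with
    | nil => simp [pvLoopA, pvBlocksB]
    | cons l ls' =>
      have hsplit : ls' = ls'.takeWhile (fun x => !pvIsBoundary x) ++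
          ls'.dropWhile (fun x => !pvIsBoundary x) := (List.takeWhile_append_dropWhile ..).symm
      have hbodyF : ∀ x ∈ ls'.takeWhile (fun x => !pvIsBoundary x), pvIsBoundary x = false := by
        intro x hx
        simpa using List.mem_takeWhile_imp hx
      have hrlen : (ls'.dropWhile (fun x => !pvIsBoundary x)).length ≤ n := by
        have h1 := List.length_dropWhile_le (fun x => !pvIsBoundary x) ls'
        have h2 : ls'.length + 1 ≤ n + 1 := by simpa using hls
        omega
      have hrshape : ls'.dropWhile (fun x => !pvIsBoundary x) = [] ∨
          ∃ r rs, ls'.dropWhile (fun x => !pvIsBoundary x) = r :: rs ∧ pvIsBoundary r = true := by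
        cases hr : ls'.dropWhile (fun x => !pvIsBoundary x) with
        | nil => exact Or.inl rfl
        | cons r rs =>
          refine Or.inr ⟨r, rs, rfl, ?_⟩
          have hh := List.head?_dropWhile_not (fun x => !pvIsBoundary x) ls'
          rw [hr] at hh
          simpa using hh
      have ihrest := ih (ls'.dropWhile (fun x => !pvIsBoundary x)) hrlen
      have hrestT := ihrest.2 hrshape
      have hrestF := ihrest.1
      have hblocks : pvBlocksB (l :: ls') =
          (l :: ls'.takeWhile (fun x => !pvIsBoundary x)) ::
            pvBlocksB (ls'.dropWhile (fun x => !pvIsBoundary x)) := by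
        rw [pvBlocksB]
      constructor
      · -- start state false
        by_cases hm : pvIsMeta l
        · have hstep : pvLoopA (l :: ls') [] false =
              pvLoopA (ls'.dropWhile (fun x => !pvIsBoundary x)) [] true := by
            simp only [pvLoopA, hm, if_true]
            conv_lhs => rw [hsplit]
            exact pvLoopA_skip _ hbodyF _
          rw [hstep, hrestT, hblocks]
          simp [pvKeepB, hm]
        · have hstep : pvLoopA (l :: ls') [] false =
              l :: (ls'.takeWhile (fun x => !pvIsBoundary x) ++
                pvLoopA (ls'.dropWhile (fun x => !pvIsBoundary x)) [] false) := by
            simp only [pvLoopA, hm, Bool.false_eq_true, if_false, Bool.false_and,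
              List.nil_append]
            rw [pvLoopA_res]
            conv_lhs => rw [hsplit]
            rw [pvLoopA_keep _ hbodyF _]
            simp
          rw [hstep, hrestF, hblocks]
          simp [pvKeepB, hm]
      · -- start state true: only reached with a boundary head
        rintro (habs | ⟨r, rs, heq, hbound⟩)
        · exact absurd habs (by simp)
        · have hrl : r = l := by injection heq with h1 _; exact h1.symm
          subst hrl
          by_cases hm : pvIsMeta r
          · have hstep : pvLoopA (r :: ls') [] true =
                pvLoopA (ls'.dropWhile (fun x => !pvIsBoundary x)) [] true := by
              simp only [pvLoopA, hm, if_true]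
              conv_lhs => rw [hsplit]
              exact pvLoopA_skip _ hbodyF _
            rw [hstep, hrestT, hblocks]
            simp [pvKeepB, hm]
          · have hsw : PySem.Str.startswith r "## " = true := by
              simp only [pvIsBoundary, Bool.or_eq_true] at hbound
              rcases hbound with h | h
              · exact h
              · exact absurd h hm
            have hstep : pvLoopA (r :: ls') [] true =
                r :: (ls'.takeWhile (fun x => !pvIsBoundary x) ++
                  pvLoopA (ls'.dropWhile (fun x => !pvIsBoundary x)) [] false) := by
              simp only [pvLoopA, hm, hsw, Bool.false_eq_true, if_false, Bool.and_true,
                if_true, List.nil_append]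
              rw [pvLoopA_res]
              conv_lhs => rw [hsplit]
              rw [pvLoopA_keep _ hbodyF _]
              simp
            rw [hstep, hrestF, hblocks]
            simp [pvKeepB, hm]

-- ===== VERDICT (by name: the statement is the Claim_ definition above) =====
theorem strip_existing_metadata_py_spec : Claim_equal_strip_existing_metadata_py := by
  intro text _
  unfold Spec_strip_existing_metadata_py strip_existing_metadata_py strip_existing_metadata_py_alt
  rw [(pvMain ((PySem.Str.split? text "\n").getD []).length _ le_rfl).1]
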